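-- pv_equiv track=rewrite | github.com/liskos/isakovich2023 | ege23/209.py | f
-- ===== SOURCE A (Python) =====
-- def f(a, b, c):
--     if a > b:
--         return 0
--     if a == b:
--         return c % 2 == 1
--     if a > 1:
--         return f(a + 2, b, c + 1) + f(a * 2, b, c + 1) + f(a ** 2, b, c + 1)
--     else:
--         return f(a + 2, b, c + 1) + f(a * 2, b, c + 1)
-- ===== SOURCE B (Python) =====
-- def f(a, b, c):
--     # Memoized DP on the value a alone: paths(x) = (#paths from x to b with an
--     # even number of steps, # with an odd number); the parity of c only selects
--     # which component is returned at the end.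
--     memo = {}
--
--     def paths(x):
--         if x > b:
--             return (0, 0)
--         if x == b:
--             return (1, 0)
--         if x not in memo:
--             kids = [x + 2, x * 2] + ([x * x] if x > 1 else [])
--             e = o = 0
--             for k in kids:
--                 ke, ko = paths(k)
--                 e += ko
--                 o += ke
--             memo[x] = (e, o)
--         return memo[x]
--
--     e, o = paths(a)
--     return o if c % 2 == 0 else e
-- ===== Notes on version B (the rewrite author's own statement) =====
-- stated objective: faster
-- what changed: Replaces A's plain exponential three-way recursion by a single memoized pass that computes, for each reachable value x, the pair (#paths to b with an even number of steps, #odd) in a dict, so each value is expanded once; the parity of c merely selects which component is returned.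
-- outside the precondition, e.g. on f(2, 2, 1): A returns True, B returns 1; on f(2, 2, 0): A returns False, B returns 0
import Mathlib
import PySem

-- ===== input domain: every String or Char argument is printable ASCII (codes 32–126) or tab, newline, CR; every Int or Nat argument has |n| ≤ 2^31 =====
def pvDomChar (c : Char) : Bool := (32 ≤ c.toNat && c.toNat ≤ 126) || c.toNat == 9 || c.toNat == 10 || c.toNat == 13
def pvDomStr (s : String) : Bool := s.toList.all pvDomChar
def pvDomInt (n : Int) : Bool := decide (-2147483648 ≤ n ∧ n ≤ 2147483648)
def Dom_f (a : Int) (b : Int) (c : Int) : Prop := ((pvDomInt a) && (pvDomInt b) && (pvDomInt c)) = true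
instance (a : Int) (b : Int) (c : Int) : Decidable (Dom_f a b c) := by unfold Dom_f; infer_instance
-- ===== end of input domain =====

-- B replaces A's exponential three-way recursion by a memoized even/odd path-count
-- DP keyed on the value alone (objective: faster, asymptotic).

-- ===== PORT A =====
-- Fuel makes Python's general recursion total; within Pre_f every recursive call strictly
-- increases a (all calls have 1 ≤ a there), so (b - a).toNat + 1 units of fuel suffice and
-- the fuel never changes the computed value on Pre_f.
def fAux (b : Int) : Nat → Int → Int → Int
  | 0, _, _ => 0
  | Nat.succ n, a, c =>
    if a > b then 0
    else if a = b then (if PySem.Int.mod c 2 = 1 then 1 else 0)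
    else if a > 1 then
      fAux b n (a + 2) (c + 1) + fAux b n (a * 2) (c + 1) + fAux b n (a ^ 2) (c + 1)
    else
      fAux b n (a + 2) (c + 1) + fAux b n (a * 2) (c + 1)

def f (a : Int) (b : Int) (c : Int) : Int := fAux b ((b - a).toNat + 1) a c

-- ===== PORT B =====
-- kids = [x + 2, x * 2] + ([x * x] if x > 1 else [])
def fKids (x : Int) : List Int := [x + 2, x * 2] ++ (if x > 1 then [x * x] else [])

-- paths(x) with the memo dict threaded through; returns ((even, odd), memo').
-- Same fuel bound as A's port (the memoized recursion visits only values ≥ the argument).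
def pathsAux (b : Int) : Nat → Int → PySem.Dict Int (Int × Int) →
    ((Int × Int) × PySem.Dict Int (Int × Int))
  | 0, _, m => ((0, 0), m)
  | Nat.succ n, x, m =>
    if x > b then ((0, 0), m)
    else if x = b then ((1, 0), m)
    else
      match m.get? x with
      | some v => (v, m)
      | none =>
        let r := (fKids x).foldl
          (fun st k =>
            let q := pathsAux b n k st.2
            ((st.1.1 + q.1.2, st.1.2 + q.1.1), q.2))
          (((0, 0) : Int × Int), m)
        (r.1, r.2.insert x r.1)

def f_alt (a : Int) (b : Int) (c : Int) : Int :=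
  let r := pathsAux b ((b - a).toNat + 1) a PySem.Dict.empty
  if PySem.Int.mod c 2 = 0 then r.1.2 else r.1.1

-- ===== PRECONDITION & SPEC =====
-- Pre_f excludes (i) a = b, where A returns a Python bool (True/False), not an int of the
-- declared return type, and (ii) a ≤ 0 with a < b, where A's recursion never terminates
-- (RecursionError).
def Pre_f (a : Int) (b : Int) (c : Int) : Prop := a ≠ b ∧ (1 ≤ a ∨ b < a)
instance (a : Int) (b : Int) (c : Int) : Decidable (Pre_f a b c) := by unfold Pre_f; infer_instance

def pvWitness_f : Int × Int × Int := (1, 5, 0)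

def Spec_f (a : Int) (b : Int) (c : Int) (out : Int) : Prop := out = f_alt a b c
instance (a : Int) (b : Int) (c : Int) (out : Int) : Decidable (Spec_f a b c out) := by
  unfold Spec_f; infer_instance

-- ===== CLAIM (what is proved, stated in full; the proofs are below) =====
def Claim_equal_f : Prop := ∀ (a : Int) (b : Int) (c : Int), Dom_f a b c → Pre_f a b c → Spec_f a b c (f a b c)

-- ===== LEMMAS AND PROOFS =====

-- Pure (memo-free) even/odd path-count pair, same fuel pattern as both ports.
def gSpec (b : Int) : Nat → Int → Int × Int
  | 0, _ => (0, 0)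
  | Nat.succ n, x =>
    if x > b then (0, 0)
    else if x = b then (1, 0)
    else (fKids x).foldl
      (fun p k => (p.1 + (gSpec b n k).2, p.2 + (gSpec b n k).1)) (0, 0)

-- The fuel-independent value at x (enough fuel by stability below).
def F (b : Int) (x : Int) : Int × Int := gSpec b ((b - x).toNat + 1) x

-- Memo invariant: every stored entry is the true pair of a value 1 ≤ x < b.
def MemoInv (b : Int) (m : PySem.Dict Int (Int × Int)) : Prop :=
  ∀ x v, m.get? x = some v → 1 ≤ x ∧ x < b ∧ v = F b x

theorem fKids_mem {x k : Int} (hx : 1 ≤ x) (hk : k ∈ fKids x) : 1 ≤ k ∧ x < k := by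
  unfold fKids at hk
  by_cases h1 : x > 1
  · simp [h1] at hk
    rcases hk with h | h | h <;> subst h <;> constructor <;> nlinarith
  · simp [h1] at hk
    rcases hk with h | h <;> subst h <;> constructor <;> nlinarith

theorem gSpec_stable (b : Int) : ∀ n m x, 1 ≤ x → (b - x).toNat < n → (b - x).toNat < m →
    gSpec b n x = gSpec b m x := by
  intro n
  induction n with
  | zero => omega
  | succ n ih =>
    intro m x hx hn hm
    cases m with
    | zero => omega
    | succ m =>
      simp only [gSpec]
      by_cases hgt : x > b
      · simp [hgt]
      · by_cases heq : x = b
        · simp [heq]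
        · simp only [if_neg hgt, if_neg heq]
          apply PySem.List.foldl_congr_mem
          intro acc k hk
          obtain ⟨hk1, hklt⟩ := fKids_mem hx hk
          rw [ih m k hk1 (by omega) (by omega)]

theorem F_unfold (b x : Int) (hx : 1 ≤ x) (hlt : x < b) :
    F b x = (fKids x).foldl
      (fun p k => (p.1 + (F b k).2, p.2 + (F b k).1)) (0, 0) := by
  unfold F
  conv_lhs => rw [gSpec]
  rw [if_neg (by omega), if_neg (by omega)]
  apply PySem.List.foldl_congr_mem
  intro acc k hk
  obtain ⟨hk1, hklt⟩ := fKids_mem hx hk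
  rw [gSpec_stable b ((b - x).toNat) ((b - k).toNat + 1) k hk1 (by omega) (by omega)]

-- A's recursion computes exactly the parity-selected component of gSpec.
theorem fAux_eq_gSpec (b : Int) : ∀ n a c,
    fAux b n a c = (if PySem.Int.mod c 2 = 1 then (gSpec b n a).1 else (gSpec b n a).2) := by
  intro n
  induction n with
  | zero => intro a c; simp [fAux, gSpec]
  | succ n ih =>
    intro a c
    simp only [fAux, gSpec]
    by_cases hgt : a > b
    · simp [hgt]
    · by_cases heq : a = b
      · simp [heq]
      · simp only [if_neg hgt, if_neg heq]
        have h2 : PySem.Int.mod c 2 = c % 2 := PySem.Int.mod_eq_emod_of_pos (by norm_num)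
        have h2' : PySem.Int.mod (c + 1) 2 = (c + 1) % 2 :=
          PySem.Int.mod_eq_emod_of_pos (by norm_num)
        by_cases hpar : c % 2 = 1
        · have hpar' : (c + 1) % 2 = 0 := by omega
          by_cases h1 : a > 1 <;>
            simp [fKids, h1, ih, hpar, hpar', List.foldl, pow_two]
        · have hpar' : (c + 1) % 2 = 1 := by omega
          by_cases h1 : a > 1 <;>
            simp [fKids, h1, ih, hpar, hpar', List.foldl, pow_two]

theorem pathsAux_correct (b : Int) : ∀ n x m, 1 ≤ x → (b - x).toNat < n → MemoInv b m →
    (pathsAux b n x m).1 = F b x ∧ MemoInv b (pathsAux b n x m).2 := by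
  intro n
  induction n with
  | zero => omega
  | succ n ih =>
    intro x m hx hn hm
    simp only [pathsAux]
    by_cases hgt : x > b
    · refine ⟨?_, by simpa [hgt] using hm⟩
      simp only [if_pos hgt]
      unfold F; rw [gSpec]; simp [hgt]
    · by_cases heq : x = b
      · refine ⟨?_, by simpa [hgt, heq] using hm⟩
        simp only [if_neg hgt, if_pos heq]
        unfold F; rw [gSpec]; simp [heq]
      · have hlt : x < b := by omega
        simp only [if_neg hgt, if_neg heq]
        cases hget : m.get? x with
        | some v =>
          obtain ⟨_, _, hv⟩ := hm x v hget
          exact ⟨by simp [hv], by simpa using hm⟩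
        | none =>
          simp only []
          -- unfold the foldl over the concrete kid list
          have step : ∀ (k : Int) (st : (Int × Int) × PySem.Dict Int (Int × Int)),
              1 ≤ k → x < k → MemoInv b st.2 →
              (pathsAux b n k st.2).1 = F b k ∧ MemoInv b (pathsAux b n k st.2).2 := by
            intro k st hk1 hklt hinv
            exact ih k st.2 hk1 (by omega) hinv
          have main : ∀ (l : List Int), (∀ k ∈ l, 1 ≤ k ∧ x < k) →
              ∀ (st : (Int × Int) × PySem.Dict Int (Int × Int)), MemoInv b st.2 →
              (l.foldl (fun st k =>
                  ((st.1.1 + (pathsAux b n k st.2).1.2, st.1.2 + (pathsAux b n k st.2).1.1),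
                   (pathsAux b n k st.2).2)) st).1
                = l.foldl (fun p k => (p.1 + (F b k).2, p.2 + (F b k).1)) st.1 ∧
              MemoInv b (l.foldl (fun st k =>
                  ((st.1.1 + (pathsAux b n k st.2).1.2, st.1.2 + (pathsAux b n k st.2).1.1),
                   (pathsAux b n k st.2).2)) st).2 := by
            intro l
            induction l with
            | nil => intro _ st hinv; exact ⟨rfl, hinv⟩
            | cons k t iht =>
              intro hall st hinv
              obtain ⟨hk1, hklt⟩ := hall k (by simp)
              obtain ⟨hq1, hq2⟩ := step k st hk1 hklt hinv
              simp only [List.foldl_cons]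
              have := iht (fun k hk => hall k (by simp [hk]))
                ((st.1.1 + (pathsAux b n k st.2).1.2, st.1.2 + (pathsAux b n k st.2).1.1),
                 (pathsAux b n k st.2).2) hq2
              simpa [hq1] using this
          have hkids : ∀ k ∈ fKids x, 1 ≤ k ∧ x < k := fun k hk => fKids_mem hx hk
          obtain ⟨h1, h2⟩ := main (fKids x) hkids (((0, 0) : Int × Int), m) hm
          have hval : ((fKids x).foldl (fun st k =>
              ((st.1.1 + (pathsAux b n k st.2).1.2, st.1.2 + (pathsAux b n k st.2).1.1),
               (pathsAux b n k st.2).2)) (((0, 0) : Int × Int), m)).1 = F b x :=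
            h1.trans (F_unfold b x hx hlt).symm
          refine ⟨hval, ?_⟩
          intro y v hy
          rw [PySem.Dict.get?_insert] at hy
          by_cases hyx : y = x
          · subst hyx
            rw [if_pos rfl] at hy
            exact ⟨hx, hlt, (Option.some.inj hy).symm.trans hval⟩
          · rw [if_neg hyx] at hy
            exact h2 y v hy

-- ===== VERDICT (by name: the statement is the Claim_ definition above) =====
theorem f_spec : Claim_equal_f := by
  unfold Claim_equal_f
  intro a b c _ hpre
  obtain ⟨hne, hpos⟩ := hpre
  unfold Spec_f f f_alt
  by_cases hgt : a > b
  · simp only [fAux, pathsAux, if_pos hgt]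
    split_ifs <;> rfl
  · have ha : 1 ≤ a := by rcases hpos with h | h; exact h; omega
    have hlt : a < b := by omega
    have hfuel : (b - a).toNat < (b - a).toNat + 1 := by omega
    obtain ⟨h1, _⟩ := pathsAux_correct b ((b - a).toNat + 1) a PySem.Dict.empty ha hfuel
      (by intro x v hx; simp [PySem.Dict.get?_empty] at hx)
    rw [fAux_eq_gSpec]
    have hF : gSpec b ((b - a).toNat + 1) a = F b a := rfl
    rw [hF]
    simp only [h1]
    have h2 : PySem.Int.mod c 2 = c % 2 := PySem.Int.mod_eq_emod_of_pos (by norm_num)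
    by_cases hpar : c % 2 = 1
    · simp [hpar]
    · have : c % 2 = 0 := by omega
      simp [this]
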